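-- pv_equiv track=rewrite | github.com/paiml/depyler | examples/hard_realworld_tokenizer.py | tok_scan_number
-- ===== SOURCE A (Python) =====
-- def tok_is_digit(ch: str) -> int:
--     """Check if character is a digit. Returns 1 if yes."""
--     code: int = ord(ch)
--     if code >= 48 and code <= 57:
--         return 1
--     return 0
--
-- def tok_scan_number(source: str, start: int) -> list[int]:
--     """Scan a number token. Returns [end_pos, token_type]. 0=integer, 1=float."""
--     pos: int = start
--     has_dot: int = 0
--     while pos < len(source):
--         if tok_is_digit(source[pos]) == 1:
--             pos = pos + 1
--         elif source[pos] == "." and has_dot == 0: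
--             has_dot = 1
--             pos = pos + 1
--         else:
--             pos = pos
--             break
--     return [pos, has_dot]
-- ===== SOURCE B (Python) =====
-- def tok_is_digit(ch: str) -> int:
--     code = ord(ch)
--     if code >= 48 and code <= 57:
--         return 1
--     return 0
--
-- def tok_scan_number(source: str, start: int) -> list[int]:
--     """Three sequential phases: leading digits, one optional dot, trailing digits."""
--     n = len(source)
--     pos = start
--     while pos < n and tok_is_digit(source[pos]) == 1:
--         pos += 1
--     has_dot = 0
--     if pos < n and source[pos] == ".":
--         has_dot = 1
--         pos += 1
--         while pos < n and tok_is_digit(source[pos]) == 1: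
--             pos += 1
--     return [pos, has_dot]
-- ===== Notes on version B (the rewrite author's own statement) =====
-- stated objective: simpler
-- what changed: Replaced the single stateful while-loop carrying a has_dot flag and per-iteration branch by three sequential phases: skip leading digits, accept at most one dot, skip trailing digits.
import Mathlib
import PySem

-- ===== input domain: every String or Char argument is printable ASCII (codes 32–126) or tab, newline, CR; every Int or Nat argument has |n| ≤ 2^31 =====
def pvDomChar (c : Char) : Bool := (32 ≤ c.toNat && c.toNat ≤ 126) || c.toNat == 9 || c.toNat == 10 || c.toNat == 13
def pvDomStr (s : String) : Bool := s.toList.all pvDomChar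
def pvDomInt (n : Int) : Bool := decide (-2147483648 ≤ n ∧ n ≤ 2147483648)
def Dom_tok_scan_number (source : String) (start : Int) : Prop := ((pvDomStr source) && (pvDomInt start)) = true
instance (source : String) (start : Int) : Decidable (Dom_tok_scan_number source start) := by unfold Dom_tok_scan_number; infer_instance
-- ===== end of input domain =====

-- B rewrites the one stateful flag-carrying scan loop as three sequential phases
-- (digits, one optional dot, digits); same O(n) cost, simpler structure.


-- ===== PORT A =====
def tokIsDigit (ch : Char) : Int :=
  if (48 : Int) ≤ (ch.toNat : Int) ∧ (ch.toNat : Int) ≤ 57 then 1 else 0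

def tokALoop (src : List Char) (pos : Int) (hasDot : Int) : List Int :=
  if pos < (src.length : Int) then
    match PySem.List.pyGet? src pos with
    | none => [pos, hasDot]   -- Python raises IndexError here; excluded by Pre_
    | some ch =>
      if tokIsDigit ch = 1 then tokALoop src (pos + 1) hasDot
      else if ch = '.' ∧ hasDot = 0 then tokALoop src (pos + 1) 1
      else [pos, hasDot]
  else [pos, hasDot]
termination_by ((src.length : Int) - pos).toNat
decreasing_by all_goals omega

def tok_scan_number (source : String) (start : Int) : List Int :=
  tokALoop source.toList start 0

-- ===== PORT B =====
def skipDigits (src : List Char) (pos : Int) : Int :=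
  if pos < (src.length : Int) then
    match PySem.List.pyGet? src pos with
    | none => pos   -- Python raises IndexError here; excluded by Pre_
    | some ch => if tokIsDigit ch = 1 then skipDigits src (pos + 1) else pos
  else pos
termination_by ((src.length : Int) - pos).toNat
decreasing_by all_goals omega

def tok_scan_number_alt (source : String) (start : Int) : List Int :=
  let src := source.toList
  let p1 := skipDigits src start
  if p1 < (src.length : Int) ∧ PySem.List.pyGet? src p1 = some '.' then
    [skipDigits src (p1 + 1), 1]
  else
    [p1, 0]

-- ===== PRECONDITION & SPEC =====
-- Pre_ excludes only start < -len(source), where Python A raises IndexError on source[start].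
def Pre_tok_scan_number (source : String) (start : Int) : Prop :=
  -(source.toList.length : Int) ≤ start
instance (source : String) (start : Int) : Decidable (Pre_tok_scan_number source start) := by
  unfold Pre_tok_scan_number; infer_instance
def pvWitness_tok_scan_number : String × Int := ("1.", 0)

def Spec_tok_scan_number (source : String) (start : Int) (out : List Int) : Prop := out = tok_scan_number_alt source start
instance (source : String) (start : Int) (out : List Int) : Decidable (Spec_tok_scan_number source start out) := by unfold Spec_tok_scan_number; infer_instance

-- ===== CLAIM (what is proved, stated in full; the proofs are below) =====
def Claim_equal_tok_scan_number : Prop := ∀ (source : String) (start : Int), Dom_tok_scan_number source start → Pre_tok_scan_number source start → Spec_tok_scan_number source start (tok_scan_number source start)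

-- ===== LEMMAS AND PROOFS =====

-- with the flag already set, A's loop just skips digits
lemma tokALoop_one (src : List Char) (pos : Int) :
    tokALoop src pos 1 = [skipDigits src pos, 1] := by
  unfold tokALoop skipDigits
  split
  · rename_i h
    match hg : PySem.List.pyGet? src pos with
    | none => simp
    | some ch =>
      by_cases hd : tokIsDigit ch = 1
      · simp only [hd, if_true]
        exact tokALoop_one src (pos + 1)
      · simp [hd]
  · rfl
termination_by ((src.length : Int) - pos).toNat
decreasing_by all_goals omega

lemma tokALoop_zero (src : List Char) (pos : Int) :
    tokALoop src pos 0 =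
      (let p1 := skipDigits src pos;
       if p1 < (src.length : Int) ∧ PySem.List.pyGet? src p1 = some '.' then
         [skipDigits src (p1 + 1), 1]
       else [p1, 0]) := by
  unfold tokALoop
  split
  · rename_i h
    match hg : PySem.List.pyGet? src pos with
    | none =>
      -- skipDigits stops here too, and the char at p1 = pos is not some '.'
      have hs : skipDigits src pos = pos := by rw [skipDigits]; simp [h, hg]
      simp [hs, hg]
    | some ch =>
      by_cases hd : tokIsDigit ch = 1
      · have hs : skipDigits src pos = skipDigits src (pos + 1) := by
          rw [skipDigits]; simp [h, hg, hd]
        simp only [hd, if_true]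
        rw [tokALoop_zero src (pos + 1)]
        simp [hs]
      · have hs : skipDigits src pos = pos := by rw [skipDigits]; simp [h, hg, hd]
        by_cases hc : ch = '.'
        · subst hc
          simp [hd, hs, h, hg, tokALoop_one]
        · simp [hd, hc, hs, hg]
  · rename_i h
    have hs : skipDigits src pos = pos := by rw [skipDigits]; simp [h]
    simp [hs, h]
termination_by ((src.length : Int) - pos).toNat
decreasing_by all_goals omega

-- ===== VERDICT (by name: the statement is the Claim_ definition above) =====
theorem tok_scan_number_spec : Claim_equal_tok_scan_number := by
  intro source start _ _
  unfold Spec_tok_scan_number tok_scan_number tok_scan_number_alt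
  exact tokALoop_zero source.toList start
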